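-- pv_equiv track=rewrite | github.com/kineticsquid/game-musings | average-hand-score.py | score_hand_second_round
-- ===== SOURCE A (Python) =====
-- suits = ['Hearts', 'Diamonds', 'Spades', 'Clubs']
--
-- def score_card(card, trump_suit):
--     score = 0
--     if card[1] == trump_suit:
--         if card[0] == 'Jack':
--             score = 4
--         elif card[0] == 'Ace':
--             score = 3
--         elif card[0] == 'King':
--             score = 2
--         elif card[0] == 'Queen':
--             score = 2
--         else:
--             score = 1
--     elif card[0] == 'Jack':
--         if trump_suit == 'Hearts' or trump_suit == 'Diamonds':
--             if card[1] == 'Hearts' or card[1] == 'Diamonds':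
--                 score = 3
--         elif trump_suit == 'Clubs' or trump_suit == 'Spades':
--             if card[1] == 'Clubs' or card[1] == 'Spades':
--                 score = 3
--     elif card[0] == 'Ace':
--         score = 2
--     else:
--         score = 0
--     return score
--
-- def score_hand_second_round(hand):
--     max_score = 0
--     for suit in suits:
--         score = 0
--         for card in hand:
--             score += score_card(card, suit)
--         if score > max_score:
--             max_score = score
--
--     suits_found = []
--     for card in hand:
--         if card[1] not in suits_found:
--             suits_found.append(card[1])
--     if len(suits_found) <= 2:
--         max_score += 1
--
--     return max_score
-- ===== SOURCE B (Python) =====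
-- suits = ['Hearts', 'Diamonds', 'Spades', 'Clubs']
--
-- def score_hand_second_round(hand):
--     # One pass: each card adds its sparse per-trump-suit contribution to
--     # four accumulators; then take the max and add the shortness bonus.
--     h = d = s = c = 0
--     seen = set()
--     for rank, st in hand:
--         seen.add(st)
--         if rank == 'Jack':
--             if st == 'Hearts':
--                 h += 4; d += 3
--             elif st == 'Diamonds':
--                 d += 4; h += 3
--             elif st == 'Spades':
--                 s += 4; c += 3
--             elif st == 'Clubs':
--                 c += 4; s += 3
--         elif rank == 'Ace':
--             h += 2; d += 2; s += 2; c += 2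
--             if st == 'Hearts':
--                 h += 1
--             elif st == 'Diamonds':
--                 d += 1
--             elif st == 'Spades':
--                 s += 1
--             elif st == 'Clubs':
--                 c += 1
--         else:
--             pts = 2 if rank in ('King', 'Queen') else 1
--             if st == 'Hearts':
--                 h += pts
--             elif st == 'Diamonds':
--                 d += pts
--             elif st == 'Spades':
--                 s += pts
--             elif st == 'Clubs':
--                 c += pts
--     best = max(h, d, s, c)
--     return best + 1 if len(seen) <= 2 else best
-- ===== Notes on version B (the rewrite author's own statement) =====
-- stated objective: alternative
-- what changed: Single pass over the hand distributing each card's sparse contribution into four per-trump-suit accumulators (and a set of suits seen), then one max and the bonus, instead of rescanning the whole hand once per trump suit with score_card.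
import Mathlib
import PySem

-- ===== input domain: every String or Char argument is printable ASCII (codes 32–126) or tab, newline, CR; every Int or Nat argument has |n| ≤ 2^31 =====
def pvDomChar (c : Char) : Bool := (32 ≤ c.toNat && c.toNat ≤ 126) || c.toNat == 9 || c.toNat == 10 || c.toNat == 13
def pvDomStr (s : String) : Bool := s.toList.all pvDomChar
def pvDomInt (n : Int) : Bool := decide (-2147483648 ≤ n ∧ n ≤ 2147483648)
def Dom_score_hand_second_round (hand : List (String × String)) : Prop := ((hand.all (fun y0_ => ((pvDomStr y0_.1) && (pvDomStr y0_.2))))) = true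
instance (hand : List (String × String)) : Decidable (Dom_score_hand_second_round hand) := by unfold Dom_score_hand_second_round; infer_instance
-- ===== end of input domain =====

-- B replaces A's four full rescans of the hand (one per trump suit) by a single
-- pass distributing each card's sparse contribution into four accumulators
-- (alternative decomposition, same exact result).


-- ===== PORT A =====
def pySuits : List String := ["Hearts", "Diamonds", "Spades", "Clubs"]

def score_card (card : String × String) (trump_suit : String) : Int :=
  if card.2 == trump_suit then
    if card.1 == "Jack" then 4
    else if card.1 == "Ace" then 3
    else if card.1 == "King" then 2
    else if card.1 == "Queen" then 2
    else 1
  else if card.1 == "Jack" then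
    if trump_suit == "Hearts" || trump_suit == "Diamonds" then
      if card.2 == "Hearts" || card.2 == "Diamonds" then 3 else 0
    else if trump_suit == "Clubs" || trump_suit == "Spades" then
      if card.2 == "Clubs" || card.2 == "Spades" then 3 else 0
    else 0
  else if card.1 == "Ace" then 2
  else 0

def score_hand_second_round (hand : List (String × String)) : Int :=
  let max_score : Int :=
    pySuits.foldl (fun max_score suit =>
      let score : Int := hand.foldl (fun score card => score + score_card card suit) 0
      if score > max_score then score else max_score) 0
  let suits_found : List String :=
    hand.foldl (fun acc card => if acc.contains card.2 then acc else acc ++ [card.2]) []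
  if (suits_found.length : Int) ≤ 2 then max_score + 1 else max_score

-- ===== PORT B =====
def bStep (st5 : Int × Int × Int × Int × PySem.Set String) (card : String × String) :
    Int × Int × Int × Int × PySem.Set String :=
  let (h, d, s, c, seen) := st5
  let seen := PySem.Set.add seen card.2
  let rank := card.1
  let st := card.2
  if rank == "Jack" then
    if st == "Hearts" then (h + 4, d + 3, s, c, seen)
    else if st == "Diamonds" then (h + 3, d + 4, s, c, seen)
    else if st == "Spades" then (h, d, s + 4, c + 3, seen)
    else if st == "Clubs" then (h, d, s + 3, c + 4, seen)
    else (h, d, s, c, seen)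
  else if rank == "Ace" then
    let h := h + 2; let d := d + 2; let s := s + 2; let c := c + 2
    if st == "Hearts" then (h + 1, d, s, c, seen)
    else if st == "Diamonds" then (h, d + 1, s, c, seen)
    else if st == "Spades" then (h, d, s + 1, c, seen)
    else if st == "Clubs" then (h, d, s, c + 1, seen)
    else (h, d, s, c, seen)
  else
    let pts : Int := if rank == "King" || rank == "Queen" then 2 else 1
    if st == "Hearts" then (h + pts, d, s, c, seen)
    else if st == "Diamonds" then (h, d + pts, s, c, seen)
    else if st == "Spades" then (h, d, s + pts, c, seen)
    else if st == "Clubs" then (h, d, s, c + pts, seen)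
    else (h, d, s, c, seen)

def score_hand_second_round_alt (hand : List (String × String)) : Int :=
  let (h, d, s, c, seen) := hand.foldl bStep (0, 0, 0, 0, PySem.Set.empty)
  let best := max (max (max h d) s) c
  if (PySem.Set.len seen : Int) ≤ 2 then best + 1 else best

-- ===== PRECONDITION & SPEC =====
def Spec_score_hand_second_round (hand : List (String × String)) (out : Int) : Prop := out = score_hand_second_round_alt hand
instance (hand : List (String × String)) (out : Int) : Decidable (Spec_score_hand_second_round hand out) := by unfold Spec_score_hand_second_round; infer_instance

-- ===== CLAIM (what is proved, stated in full; the proofs are below) =====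
def Claim_equal_score_hand_second_round : Prop := ∀ (hand : List (String × String)), Dom_score_hand_second_round hand → Spec_score_hand_second_round hand (score_hand_second_round hand)

-- ===== LEMMAS AND PROOFS =====

theorem score_card_nonneg (card : String × String) (t : String) : 0 ≤ score_card card t := by
  unfold score_card; split_ifs <;> norm_num

-- per-card: B's sparse update adds exactly score_card for each of the four trump suits
theorem bStep_delta (h d s c : Int) (seen : PySem.Set String) (card : String × String) :
    bStep (h, d, s, c, seen) card =
      (h + score_card card "Hearts", d + score_card card "Diamonds",
       s + score_card card "Spades", c + score_card card "Clubs",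
       PySem.Set.add seen card.2) := by
  obtain ⟨r, st⟩ := card
  simp only [bStep, score_card]
  by_cases h1 : st = "Hearts" <;> by_cases h2 : st = "Diamonds" <;>
    by_cases h3 : st = "Spades" <;> by_cases h4 : st = "Clubs" <;>
    by_cases r1 : r = "Jack" <;> by_cases r2 : r = "Ace" <;>
    by_cases r3 : r = "King" <;> by_cases r4 : r = "Queen" <;>
    simp_all <;> omega

theorem bFold_eq (l : List (String × String)) (h d s c : Int) (seen : PySem.Set String) :
    l.foldl bStep (h, d, s, c, seen) =
      (h + (l.map (score_card · "Hearts")).sum,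
       d + (l.map (score_card · "Diamonds")).sum,
       s + (l.map (score_card · "Spades")).sum,
       c + (l.map (score_card · "Clubs")).sum,
       l.foldl (fun acc card => PySem.Set.add acc card.2) seen) := by
  induction l generalizing h d s c seen with
  | nil => simp
  | cons x xs ih =>
      simp only [List.foldl_cons, List.map_cons, List.sum_cons, bStep_delta, ih]
      ring_nf

theorem suits_found_eq (l : List (String × String)) (seen : List String) :
    l.foldl (fun acc card => if acc.contains card.2 then acc else acc ++ [card.2]) seen =
      l.foldl (fun acc card => PySem.Set.add acc card.2) seen := rfl

theorem sum_scores_nonneg (l : List (String × String)) (t : String) :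
    0 ≤ (l.map (score_card · t)).sum := by
  induction l with
  | nil => simp
  | cons x xs ih => simpa using add_nonneg (score_card_nonneg x t) ih

theorem max_chain (a b c d : Int) (ha : 0 ≤ a) (hb : 0 ≤ b) (hc : 0 ≤ c) (hd : 0 ≤ d) :
    (if d > (if c > (if b > (if a > 0 then a else 0) then b
       else if a > 0 then a else 0) then c
       else if b > (if a > 0 then a else 0) then b else if a > 0 then a else 0) then d
     else if c > (if b > (if a > 0 then a else 0) then b
       else if a > 0 then a else 0) then c
       else if b > (if a > 0 then a else 0) then b else if a > 0 then a else 0) =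
    max (max (max a b) c) d := by
  simp only [max_def]; split_ifs <;> omega

-- ===== VERDICT (by name: the statement is the Claim_ definition above) =====
theorem score_hand_second_round_spec : Claim_equal_score_hand_second_round := by
  intro hand _
  unfold Spec_score_hand_second_round score_hand_second_round score_hand_second_round_alt
  simp only [bFold_eq, pySuits, List.foldl_cons, List.foldl_nil,
    PySem.List.foldl_add, PySem.Set.empty, PySem.Set.len, suits_found_eq, zero_add]
  have hH := sum_scores_nonneg hand "Hearts"
  have hD := sum_scores_nonneg hand "Diamonds"
  have hS := sum_scores_nonneg hand "Spades"
  have hC := sum_scores_nonneg hand "Clubs"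
  rw [max_chain _ _ _ _ hH hD hS hC]
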